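-- pv_equiv track=rewrite | github.com/EstherBear/whos-waldo | preprocess_new/create_txtdb_clip.py | replace_name_token_cased
-- ===== SOURCE A (Python) =====
-- def replace_name_token_cased(tokens):
--     """
--     :param tokens: tokens output by the cased BertTokenizer
--     :return: tokens with the sequence 164('['), 1271('name'), 166(']') replaced by 104 ('[NAME]')
--     """
--     while 1271 in tokens:
--         i = tokens.index(1271)
--         if i - 1 >= 0 and i + 1 < len(tokens) and tokens[i - 1] == 164 and tokens[i + 1] == 166:
--             tokens[i - 1] = 104
--             del tokens[i + 1]
--             del tokens[i]
--         else:
--             tokens[i] = 105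
--     for i in range(len(tokens)):
--         if tokens[i] == 105: tokens[i] = 1271
--     return tokens
-- ===== SOURCE B (Python) =====
-- def replace_name_token_cased(tokens):
--     """Single left-to-right pass: collapse each occurrence of the triple
--     164, 1271, 166 into 104; every other token is copied, with 105 rewritten
--     to 1271 (as A's final pass does).  Mutates `tokens` in place like A."""
--     out = []
--     i = 0
--     n = len(tokens)
--     while i < n:
--         if i + 2 < n and tokens[i] == 164 and tokens[i + 1] == 1271 and tokens[i + 2] == 166:
--             out.append(104)
--             i += 3
--         else:
--             out.append(1271 if tokens[i] == 105 else tokens[i])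
--             i += 1
--     tokens[:] = out
--     return tokens
-- ===== Notes on version B (the rewrite author's own statement) =====
-- stated objective: alternative
-- what changed: A repeatedly rescans the list (`while 1271 in tokens` + `tokens.index`) deleting in place, marks lone 1271 with a temporary 105 sentinel and restores it in a second full pass; B builds the output in one left-to-right pass, collapsing each 164,1271,166 triple to 104 and rewriting 105 to 1271 inline, with no sentinel and no second pass.
import Mathlib
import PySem

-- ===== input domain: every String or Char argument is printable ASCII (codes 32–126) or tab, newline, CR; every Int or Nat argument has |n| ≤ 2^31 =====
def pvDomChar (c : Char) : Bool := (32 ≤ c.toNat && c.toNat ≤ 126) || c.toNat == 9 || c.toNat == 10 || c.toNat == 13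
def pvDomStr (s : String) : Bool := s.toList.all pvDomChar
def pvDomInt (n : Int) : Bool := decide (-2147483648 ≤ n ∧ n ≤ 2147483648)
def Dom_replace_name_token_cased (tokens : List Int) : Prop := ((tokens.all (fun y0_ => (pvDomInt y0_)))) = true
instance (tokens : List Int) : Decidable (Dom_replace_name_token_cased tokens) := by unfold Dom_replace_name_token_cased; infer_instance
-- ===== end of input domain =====

-- B replaces A's repeated `in`/`index` rescans with in-place deletion (and its temporary
-- 105 sentinel plus second restore pass) by a single left-to-right pass that collapses each
-- 164,1271,166 triple to 104 and rewrites 105 to 1271 inline.  Both Pythons mutate `tokens`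
-- in place to the same value they return; the theorems are about the return value.

-- ===== PORT A =====
-- helper lemmas cited by the while loop's `decreasing_by` proof
theorem pvGetLen {p s : List Int} {a : Int} : (p ++ a :: s)[p.length]? = some a := by
  simp

-- `tokens = p ++ 1271 :: s` with `tokens.index(1271) = len(p)` and no 1271 in p
theorem pvSplit (t : List Int) (h : (1271:Int) ∈ t) :
    ∃ p s, t = p ++ 1271 :: s ∧ (1271:Int) ∉ p ∧ t.idxOf 1271 = p.length := by
  induction t with
  | nil => cases h
  | cons x xs ih =>
    by_cases hx : x = (1271:Int)
    · exact ⟨[], xs, by simp [hx], by simp, by simp [hx]⟩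
    · have hm : (1271:Int) ∈ xs := by
        rcases List.mem_cons.mp h with h1 | h1
        · exact absurd h1.symm hx
        · exact h1
      rcases ih hm with ⟨p, s, h1, h2, h3⟩
      refine ⟨x :: p, s, by simp [h1], ?_, ?_⟩
      · simp [h2]; omega
      · have hb : (x == (1271:Int)) = false := by simp; omega
        simp [List.idxOf_cons, hb, h3]

theorem pvGetSet {l : List Int} {i j : Nat} {x : Int} (h : i ≠ j) :
    (l.set i x)[j]? = l[j]? := by
  induction l generalizing i j with
  | nil => simp
  | cons a as ih =>
    cases i with
    | zero => cases j with
      | zero => omega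
      | succ j' => simp
    | succ i' => cases j with
      | zero => simp
      | succ j' => simpa using ih (by omega)

theorem pvGetErase {l : List Int} {j k : Nat} (h : j < k) :
    (l.eraseIdx k)[j]? = l[j]? := by
  induction l generalizing j k with
  | nil => simp
  | cons a as ih =>
    cases k with
    | zero => omega
    | succ k' => cases j with
      | zero => simp
      | succ j' => simpa using ih (by omega)

theorem pvCountEraseLe (a : Int) (l : List Int) (j : Nat) :
    List.count a (l.eraseIdx j) ≤ List.count a l := by
  induction l generalizing j with
  | nil => simp
  | cons x xs ih =>
    cases j with
    | zero => simp [List.count_cons]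
    | succ j' =>
      simp only [List.eraseIdx_cons_succ, List.count_cons]
      have := ih j'
      split <;> omega

theorem pvCountEraseLt (a : Int) (l : List Int) (j : Nat) (h : l[j]? = some a) :
    List.count a (l.eraseIdx j) < List.count a l := by
  induction l generalizing j with
  | nil => simp at h
  | cons x xs ih =>
    cases j with
    | zero =>
      simp at h
      simp [h]
    | succ j' =>
      simp only [List.getElem?_cons_succ] at h
      simp only [List.eraseIdx_cons_succ, List.count_cons]
      have := ih j' h
      split <;> omega

theorem pvCountSetLe (a x : Int) (hx : x ≠ a) (l : List Int) (j : Nat) :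
    List.count a (l.set j x) ≤ List.count a l := by
  induction l generalizing j with
  | nil => simp
  | cons y ys ih =>
    cases j with
    | zero =>
      simp [List.count_cons, hx]
    | succ j' =>
      simp only [List.set_cons_succ, List.count_cons]
      have := ih j'
      split <;> omega

theorem pvCountSetLt (a x : Int) (hx : x ≠ a) (l : List Int) (j : Nat) (h : l[j]? = some a) :
    List.count a (l.set j x) < List.count a l := by
  induction l generalizing j with
  | nil => simp at h
  | cons y ys ih =>
    cases j with
    | zero =>
      simp at h
      simp [hx, h]
    | succ j' =>
      simp only [List.getElem?_cons_succ] at h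
      simp only [List.set_cons_succ, List.count_cons]
      have := ih j' h
      split <;> omega

-- the `while 1271 in tokens:` loop of A, step for step
def pyAWhile (t : List Int) : List Int :=
  if h : (1271 : Int) ∈ t then
    let i := t.idxOf 1271
    if 1 ≤ i ∧ i + 1 < t.length ∧ t[i-1]? = some 164 ∧ t[i+1]? = some 166 then
      -- tokens[i-1] = 104; del tokens[i+1]; del tokens[i]
      pyAWhile (((t.set (i-1) 104).eraseIdx (i+1)).eraseIdx i)
    else
      -- tokens[i] = 105
      pyAWhile (t.set i 105)
  else t
termination_by t.count 1271
decreasing_by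
  · rename_i hg
    have hti : t[t.idxOf 1271]? = some 1271 := by
      rcases pvSplit t h with ⟨p, s, rfl, -, hi⟩
      rw [hi, pvGetLen]
    obtain ⟨hg1, -, -, -⟩ := hg
    have h1 : ((t.set (t.idxOf 1271 - 1) 104).eraseIdx (t.idxOf 1271 + 1))[t.idxOf 1271]?
        = some 1271 := by
      rw [pvGetErase (by omega), pvGetSet (by omega)]
      exact hti
    calc List.count 1271 (((t.set (t.idxOf 1271 - 1) 104).eraseIdx (t.idxOf 1271 + 1)).eraseIdx (t.idxOf 1271))
        < List.count 1271 ((t.set (t.idxOf 1271 - 1) 104).eraseIdx (t.idxOf 1271 + 1)) :=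
          pvCountEraseLt _ _ _ h1
      _ ≤ List.count 1271 (t.set (t.idxOf 1271 - 1) 104) := pvCountEraseLe _ _ _
      _ ≤ List.count 1271 t := pvCountSetLe _ _ (by omega) _ _
  · have hti : t[t.idxOf 1271]? = some 1271 := by
      rcases pvSplit t h with ⟨p, s, rfl, -, hi⟩
      rw [hi, pvGetLen]
    exact pvCountSetLt _ _ (by omega) _ _ hti

-- the final `for i in range(len(tokens)): if tokens[i] == 105: tokens[i] = 1271`
-- (each position is rewritten independently → structural recursion over the list)
def pyAFinal : List Int → List Int
  | [] => []
  | x :: xs => (if x = 105 then 1271 else x) :: pyAFinal xs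

def replace_name_token_cased (tokens : List Int) : List Int :=
  pyAFinal (pyAWhile tokens)

-- ===== PORT B =====
-- Source B's single `while i < n:` pass; the triple test `tokens[i]==164 and
-- tokens[i+1]==1271 and tokens[i+2]==166` (with i+2 in range) is the first pattern
def pyBGo : List Int → List Int
  | 164 :: 1271 :: 166 :: ts => 104 :: pyBGo ts
  | x :: xs => (if x = 105 then 1271 else x) :: pyBGo xs
  | [] => []

def replace_name_token_cased_alt (tokens : List Int) : List Int := pyBGo tokens

-- ===== PRECONDITION & SPEC =====
def Spec_replace_name_token_cased (tokens : List Int) (out : List Int) : Prop :=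
  out = replace_name_token_cased_alt tokens
instance (tokens : List Int) (out : List Int) : Decidable (Spec_replace_name_token_cased tokens out) := by
  unfold Spec_replace_name_token_cased; infer_instance

-- ===== CLAIM (what is proved, stated in full; the proofs are below) =====
def Claim_equal_replace_name_token_cased : Prop := ∀ (tokens : List Int), Dom_replace_name_token_cased tokens → Spec_replace_name_token_cased tokens (replace_name_token_cased tokens)

-- ===== LEMMAS AND PROOFS =====

theorem pvSetLen {p s : List Int} {a v : Int} : (p ++ a :: s).set p.length v = p ++ v :: s := by
  simp

theorem pvEraseLen {p s : List Int} {a : Int} : (p ++ a :: s).eraseIdx p.length = p ++ s := by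
  induction p with
  | nil => simp
  | cons x xs ih => simp [ih]


-- functional meaning of A's while loop: one scan that collapses triples and marks lone 1271 as 105
def aScan : List Int → List Int
  | 164 :: 1271 :: 166 :: ts => 104 :: aScan ts
  | 1271 :: xs => 105 :: aScan xs
  | x :: xs => x :: aScan xs
  | [] => []

theorem aScan_triple (ts : List Int) : aScan (164 :: 1271 :: 166 :: ts) = 104 :: aScan ts := rfl

theorem aScan_1271 (xs : List Int) : aScan (1271 :: xs) = 105 :: aScan xs := by
  rcases xs with _ | ⟨y, _ | ⟨z, ts⟩⟩ <;> rfl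

theorem aScan_cons (x : Int) (xs : List Int)
    (h1 : ∀ ts, ¬(x = 164 ∧ xs = 1271 :: 166 :: ts)) (h2 : x ≠ 1271) :
    aScan (x :: xs) = x :: aScan xs := by
  rw [aScan.eq_def]
  split
  · rename_i ts heq
    rw [List.cons.injEq] at heq
    exact absurd ⟨heq.1, heq.2⟩ (h1 ts)
  · rename_i heq
    rw [List.cons.injEq] at heq
    exact absurd heq.1 h2
  · rename_i heq
    rw [List.cons.injEq] at heq
    rw [heq.1, heq.2]
  · rename_i heq; exact absurd heq (by simp)

theorem pyBGo_triple (ts : List Int) : pyBGo (164 :: 1271 :: 166 :: ts) = 104 :: pyBGo ts := rfl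

theorem pyBGo_cons (x : Int) (xs : List Int)
    (h1 : ∀ ts, ¬(x = 164 ∧ xs = 1271 :: 166 :: ts)) :
    pyBGo (x :: xs) = (if x = 105 then 1271 else x) :: pyBGo xs := by
  rw [pyBGo.eq_def]
  split
  · rename_i ts heq
    rw [List.cons.injEq] at heq
    exact absurd ⟨heq.1, heq.2⟩ (h1 ts)
  · rename_i heq
    rw [List.cons.injEq] at heq
    rw [heq.1, heq.2]
  · rename_i heq; exact absurd heq (by simp)

-- aScan passes a 1271-free prefix through, unless its last element 164 meets 1271 :: 166 :: _
theorem aScan_append (p l : List Int) (hp : (1271:Int) ∉ p)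
    (hl : p.getLast? = some 164 → ∀ ts, l ≠ 1271 :: 166 :: ts) :
    aScan (p ++ l) = p ++ aScan l := by
  induction p with
  | nil => simp
  | cons x xs ih =>
    have hx : x ≠ (1271:Int) := fun hc => hp (by simp [hc])
    have hxs : (1271:Int) ∉ xs := fun hc => hp (by simp [hc])
    rw [List.cons_append, aScan_cons]
    · rw [ih hxs]
      · simp
      · intro hlast ts
        apply hl
        cases xs with
        | nil => simp at hlast
        | cons y ys => rw [List.getLast?_cons_cons]; exact hlast
    · rintro ts ⟨hx164, htake⟩
      cases xs with
      | nil =>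
        simp only [List.nil_append] at htake
        exact hl (by simp [hx164]) ts htake
      | cons y ys =>
        rw [List.cons_append, List.cons.injEq] at htake
        exact hxs (by simp [htake.1])
    · exact hx

theorem aScan_id (t : List Int) (h : (1271:Int) ∉ t) : aScan t = t := by
  induction t using aScan.induct with
  | case1 ts ih => exact absurd (by simp) h
  | case2 xs ih => exact absurd (by simp) h
  | case3 x xs h1 h2 ih =>
    rw [aScan_cons x xs (fun ts ⟨a, b⟩ => h1 ts a b) (fun hc => h2 hc)]
    rw [ih (fun hc => h (by simp [hc]))]
  | case4 => rfl

-- A's while loop computes aScan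
theorem pyAWhile_eq (t : List Int) : pyAWhile t = aScan t := by
  induction t using pyAWhile.induct with
  | case1 t h i hg ih =>
    rcases pvSplit t h with ⟨p, s, rfl, hp, hi⟩
    have hi' : i = p.length := hi
    rcases hg with ⟨hg1, hg2, hg3, hg4⟩
    rw [hi'] at hg1 hg2 hg3 hg4 ih
    conv_lhs => rw [pyAWhile]
    rw [dif_pos h]
    simp only [hi]
    rw [if_pos ⟨hg1, hg2, hg3, hg4⟩]
    rcases List.eq_nil_or_concat p with rfl | ⟨p', a, rfl⟩
    · simp at hg1
    · simp only [List.concat_eq_append] at hp hg2 hg3 hg4 ih ⊢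
      have ha : a = 164 := by
        have : ((p' ++ [a]) ++ 1271 :: s)[(p' ++ [a]).length - 1]? = some a := by
          simp
        rw [this] at hg3; exact (Option.some.injEq _ _).mp hg3
      rcases s with _ | ⟨b, s'⟩
      · simp at hg2
      · have hb : b = 166 := by
          have : ((p' ++ [a]) ++ 1271 :: b :: s')[(p' ++ [a]).length + 1]? = some b := by
            rw [List.getElem?_append_right (by simp)]; simp
          rw [this] at hg4; exact (Option.some.injEq _ _).mp hg4
        subst ha hb
        have hp' : (1271:Int) ∉ p' := fun hc => hp (by simp [hc])
        have e1 : ((p' ++ [164]) ++ 1271 :: 166 :: s').set ((p' ++ [164]).length - 1) 104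
            = (p' ++ [104]) ++ 1271 :: 166 :: s' := by
          have h0 : (p' ++ [164]).length - 1 = p'.length := by simp
          have h1 : (p' ++ [164]) ++ 1271 :: 166 :: s' = p' ++ 164 :: (1271 :: 166 :: s') := by simp
          rw [h0, h1, pvSetLen]; simp
        have e2 : ((p' ++ [104]) ++ 1271 :: 166 :: s').eraseIdx ((p' ++ [164]).length + 1)
            = (p' ++ [104]) ++ 1271 :: s' := by
          have h1 : (p' ++ [104]) ++ 1271 :: 166 :: s' = ((p' ++ [104]) ++ [1271]) ++ 166 :: s' := by
            simp
          have h2 : (p' ++ [164]).length + 1 = ((p' ++ [104]) ++ [1271]).length := by simp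
          rw [h1, h2, pvEraseLen]; simp
        have e3 : ((p' ++ [104]) ++ 1271 :: s').eraseIdx ((p' ++ [164]).length)
            = (p' ++ [104]) ++ s' := by
          have h2 : (p' ++ [164]).length = (p' ++ [104]).length := by simp
          rw [h2, pvEraseLen]
        rw [e1, e2, e3] at ih ⊢
        rw [ih]
        have r1 : aScan ((p' ++ [104]) ++ s') = (p' ++ [104]) ++ aScan s' := by
          apply aScan_append _ _ (by simp [hp'])
          intro hlast
          simp at hlast
        have r2 : aScan ((p' ++ [164]) ++ 1271 :: 166 :: s')
            = p' ++ aScan (164 :: 1271 :: 166 :: s') := by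
          have h1 : (p' ++ [164]) ++ 1271 :: 166 :: s' = p' ++ 164 :: 1271 :: 166 :: s' := by simp
          rw [h1]
          apply aScan_append _ _ hp'
          intro _ ts hc
          cases hc
        rw [r1, r2, aScan_triple]
        simp
  | case2 t h i hg ih =>
    rcases pvSplit t h with ⟨p, s, rfl, hp, hi⟩
    have hi' : i = p.length := hi
    rw [hi'] at hg ih
    conv_lhs => rw [pyAWhile]
    rw [dif_pos h]
    simp only [hi]
    rw [if_neg hg, pvSetLen]
    rw [pvSetLen] at ih
    rw [ih]
    have r1 : aScan (p ++ 105 :: s) = p ++ aScan (105 :: s) := by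
      apply aScan_append _ _ hp
      intro _ ts hc
      cases hc
    have r2 : aScan (p ++ 1271 :: s) = p ++ aScan (1271 :: s) := by
      apply aScan_append _ _ hp
      intro hlast ts hc
      apply hg
      have hs : s = 166 :: ts := by injection hc
      subst hs
      rcases List.eq_nil_or_concat p with rfl | ⟨p', a, rfl⟩
      · simp at hlast
      · simp only [List.concat_eq_append] at hlast ⊢
        have ha : a = 164 := by simpa using hlast
        subst ha
        refine ⟨by simp, by simp; omega, ?_, ?_⟩
        · have h0 : (p' ++ [164]).length - 1 = p'.length := by simp
          have h1 : (p' ++ [164]) ++ 1271 :: 166 :: ts = p' ++ 164 :: (1271 :: 166 :: ts) := by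
            simp
          rw [h0, h1, pvGetLen]
        · have h1 : (p' ++ [164]) ++ 1271 :: 166 :: ts
              = ((p' ++ [164]) ++ [1271]) ++ 166 :: ts := by simp
          have h2 : (p' ++ [164]).length + 1 = ((p' ++ [164]) ++ [1271]).length := by simp
          rw [h1, h2, pvGetLen]
    rw [r1, r2, aScan_1271]
    have r3 : aScan (105 :: s) = 105 :: aScan s := by
      apply aScan_cons
      · rintro ts ⟨hc, _⟩; norm_num at hc
      · norm_num
    rw [r3]
  | case3 t h =>
    conv_lhs => rw [pyAWhile]
    rw [dif_neg h]
    rw [aScan_id t h]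

-- mapping 105 back to 1271 after A's scan gives exactly B's pass (on every input:
-- both a lone-1271 mark and an original 105 end up as 1271 on each side)
theorem final_aScan_eq_bGo (t : List Int) : pyAFinal (aScan t) = pyBGo t := by
  induction t using aScan.induct with
  | case1 ts ih =>
    rw [aScan_triple, pyBGo_triple, pyAFinal, ih]
    norm_num
  | case2 xs ih =>
    rw [aScan_1271, pyAFinal, pyBGo_cons 1271 xs (fun ts ⟨a, _⟩ => by norm_num at a), ih]
    norm_num
  | case3 x xs h1 h2 ih =>
    rw [aScan_cons x xs (fun ts ⟨a, b⟩ => h1 ts a b) (fun hc => h2 hc),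
      pyBGo_cons x xs (fun ts ⟨a, b⟩ => h1 ts a b), pyAFinal, ih]
  | case4 => rfl

-- ===== VERDICT (by name: the statement is the Claim_ definition above) =====
theorem replace_name_token_cased_spec : Claim_equal_replace_name_token_cased := by
  intro tokens _
  unfold Spec_replace_name_token_cased replace_name_token_cased replace_name_token_cased_alt
  rw [pyAWhile_eq]
  exact final_aScan_eq_bGo tokens
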